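-- pv_equiv track=rewrite | github.com/liron7722/AccessibleCourtData | web_crawler/Scrape.py | getListofsplitDates
-- ===== SOURCE A (Python) =====
-- def isThisLeapYear(year):
--     if (year % 4) != 0:
--         return [31, 28, 31, 30, 31, 30, 31, 31, 30, 31, 30, 31]
--     else:
--         return [31, 28, 31, 30, 31, 30, 31, 31, 30, 31, 30, 31]
--
-- def getTheNextDay(day, month, year):
--     maxDay = isThisLeapYear(year)
--     if day < maxDay[month - 1]:
--         day += 1
--     else:
--         day = 1
--         if month < 12:
--             month += 1
--         else:
--             month = 1
--             year += 1
--     return day, month, year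
--
-- def getListofsplitDates(startD, startM, startY, endD, EndM, EndY):
--     startDateList = list()
--     EndDateList = list()
--     while startY <= EndY:
--         if startY + 2 < EndY:
--             EndDateList.append([startD, startM, (startY + 2)])
--         else:
--             EndDateList.append([endD, EndM, EndY])
--         startDateList.append([startD, startM, startY])
--         startD, startM, startY = getTheNextDay(startD, startM, startY + 2)
--
--     return startDateList, EndDateList
-- ===== SOURCE B (Python) =====
-- MONTH_DAYS = [31, 28, 31, 30, 31, 30, 31, 31, 30, 31, 30, 31]
--
--
-- def getListofsplitDates(startD, startM, startY, endD, EndM, EndY):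
--     # Emit whole month-runs at a time: within one month the day just counts up
--     # by 1 and the year by 2 per entry, so each run is generated arithmetically.
--     starts, ends = [], []
--     d, m, y = startD, startM, startY
--     while y <= EndY:
--         monthLen = MONTH_DAYS[m - 1]
--         full = max(monthLen - d, 0) + 1        # entries until the month rolls over
--         run = min(full, (EndY - y) // 2 + 1)   # entries still within the year bound
--         for i in range(run):
--             starts.append([d + i, m, y + 2 * i])
--             ends.append([d + i, m, y + 2 * i + 2] if y + 2 * i + 2 < EndY
--                         else [endD, EndM, EndY])
--         if m < 12:
--             d, m, y = 1, m + 1, y + 2 * run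
--         else:
--             d, m, y = 1, 1, y + 2 * run + 1
--     return starts, ends
-- ===== Notes on version B (the rewrite author's own statement) =====
-- stated objective: alternative
-- what changed: B replaces A's one-day-per-iteration state machine with a per-month block loop: for each month it computes the run length arithmetically (min of days left in the month and of (EndY-y)//2+1 from the year bound) and emits the whole run of start/end entries with a range comprehension, then jumps straight to day 1 of the next month.
import Mathlib
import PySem

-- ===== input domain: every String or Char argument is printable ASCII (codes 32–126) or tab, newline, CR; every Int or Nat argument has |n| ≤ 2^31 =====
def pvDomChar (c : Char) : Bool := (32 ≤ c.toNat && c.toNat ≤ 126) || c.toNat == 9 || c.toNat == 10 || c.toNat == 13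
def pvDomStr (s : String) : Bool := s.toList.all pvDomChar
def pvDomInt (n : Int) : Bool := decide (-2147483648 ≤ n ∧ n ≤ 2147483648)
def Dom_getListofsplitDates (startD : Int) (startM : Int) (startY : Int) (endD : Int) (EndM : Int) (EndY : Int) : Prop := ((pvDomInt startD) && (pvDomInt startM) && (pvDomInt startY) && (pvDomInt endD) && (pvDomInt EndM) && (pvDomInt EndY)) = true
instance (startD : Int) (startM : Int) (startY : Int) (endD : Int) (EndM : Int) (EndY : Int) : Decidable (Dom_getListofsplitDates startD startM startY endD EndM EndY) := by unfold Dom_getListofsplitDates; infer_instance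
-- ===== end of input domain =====

-- B walks the calendar a whole month-run at a time, generating each run's entries
-- arithmetically from range(run), instead of A's one-day-per-iteration state machine
-- (objective: alternative algorithm, same cost).

-- ===== PORT A =====
def isThisLeapYear (year : Int) : List Int :=
  if PySem.Int.mod year 4 ≠ 0 then [31, 28, 31, 30, 31, 30, 31, 31, 30, 31, 30, 31]
  else [31, 28, 31, 30, 31, 30, 31, 31, 30, 31, 30, 31]

-- returns none where Python raises IndexError (month - 1 out of range)
def getTheNextDay (day month year : Int) : Option (Int × Int × Int) :=
  match PySem.List.pyGet? (isThisLeapYear year) (month - 1) with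
  | none => none
  | some md =>
    if day < md then some (day + 1, month, year)
    else if month < 12 then some (1, month + 1, year)
    else some (1, 1, year + 1)

-- the while loop; fuel (EndY + 1 - startY).toNat only totalizes it: the year grows by
-- at least 2 per iteration, so the loop always exits before the fuel does
def loopA (endD EndM EndY : Int) (fuel : Nat) (startD startM startY : Int)
    (sAcc eAcc : List (List Int)) : List (List Int) × List (List Int) :=
  match fuel with
  | 0 => (sAcc, eAcc)
  | fuel + 1 =>
    if startY ≤ EndY then
      match getTheNextDay startD startM (startY + 2) with
      | none =>   -- Python raises IndexError here; excluded by Pre_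
          (sAcc ++ [[startD, startM, startY]],
           eAcc ++ [if startY + 2 < EndY then [startD, startM, startY + 2] else [endD, EndM, EndY]])
      | some (d, m, y) =>
          loopA endD EndM EndY fuel d m y (sAcc ++ [[startD, startM, startY]])
            (eAcc ++ [if startY + 2 < EndY then [startD, startM, startY + 2] else [endD, EndM, EndY]])
    else (sAcc, eAcc)

def getListofsplitDates (startD : Int) (startM : Int) (startY : Int) (endD : Int) (EndM : Int) (EndY : Int) : List (List Int) × List (List Int) :=
  loopA endD EndM EndY (EndY + 1 - startY).toNat startD startM startY [] []

-- ===== PORT B =====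
def monthDays : List Int := [31, 28, 31, 30, 31, 30, 31, 31, 30, 31, 30, 31]

-- B's while loop over whole month-runs; the same fuel totalization as loopA (the year
-- grows by at least 2 per block)
def loopB (endD EndM EndY : Int) (fuel : Nat) (d m y : Int)
    (sAcc eAcc : List (List Int)) : List (List Int) × List (List Int) :=
  match fuel with
  | 0 => (sAcc, eAcc)
  | fuel + 1 =>
    if y ≤ EndY then
      match PySem.List.pyGet? monthDays (m - 1) with
      | none => (sAcc, eAcc)   -- Python raises IndexError here; excluded by Pre_
      | some len =>
        let run := min (max (len - d) 0 + 1) (PySem.Int.floordiv (EndY - y) 2 + 1)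
        let sB := (List.range run.toNat).map (fun (i : Nat) => [d + (i : Int), m, y + 2 * (i : Int)])
        let eB := (List.range run.toNat).map (fun (i : Nat) =>
          if y + 2 * (i : Int) + 2 < EndY then [d + (i : Int), m, y + 2 * (i : Int) + 2]
          else [endD, EndM, EndY])
        if m < 12 then loopB endD EndM EndY fuel 1 (m + 1) (y + 2 * run) (sAcc ++ sB) (eAcc ++ eB)
        else loopB endD EndM EndY fuel 1 1 (y + 2 * run + 1) (sAcc ++ sB) (eAcc ++ eB)
    else (sAcc, eAcc)

def getListofsplitDates_alt (startD : Int) (startM : Int) (startY : Int) (endD : Int) (EndM : Int) (EndY : Int) : List (List Int) × List (List Int) :=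
  loopB endD EndM EndY (EndY + 1 - startY).toNat startD startM startY [] []

-- ===== PRECONDITION & SPEC =====
-- Pre_ excludes exactly the inputs where both Pythons raise IndexError: the loop runs
-- (startY ≤ EndY) while month - 1 is outside Python's valid index range [-12, 11].
def Pre_getListofsplitDates (startD : Int) (startM : Int) (startY : Int) (endD : Int) (EndM : Int) (EndY : Int) : Prop :=
  EndY < startY ∨ (-11 ≤ startM ∧ startM ≤ 12)
instance (startD : Int) (startM : Int) (startY : Int) (endD : Int) (EndM : Int) (EndY : Int) : Decidable (Pre_getListofsplitDates startD startM startY endD EndM EndY) := by unfold Pre_getListofsplitDates; infer_instance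

def pvWitness_getListofsplitDates : Int × Int × Int × Int × Int × Int := (1, 2, 2000, 5, 6, 2003)

def Spec_getListofsplitDates (startD : Int) (startM : Int) (startY : Int) (endD : Int) (EndM : Int) (EndY : Int) (out : List (List Int) × List (List Int)) : Prop := out = getListofsplitDates_alt startD startM startY endD EndM EndY
instance (startD : Int) (startM : Int) (startY : Int) (endD : Int) (EndM : Int) (EndY : Int) (out : List (List Int) × List (List Int)) : Decidable (Spec_getListofsplitDates startD startM startY endD EndM EndY out) := by unfold Spec_getListofsplitDates; infer_instance

-- ===== CLAIM (what is proved, stated in full; the proofs are below) =====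
def Claim_equal_getListofsplitDates : Prop := ∀ (startD : Int) (startM : Int) (startY : Int) (endD : Int) (EndM : Int) (EndY : Int), Dom_getListofsplitDates startD startM startY endD EndM EndY → Pre_getListofsplitDates startD startM startY endD EndM EndY → Spec_getListofsplitDates startD startM startY endD EndM EndY (getListofsplitDates startD startM startY endD EndM EndY)

-- ===== LEMMAS AND PROOFS =====

-- month length A's helper looks up, as a total function of the month (proof-only helper)
def mdOf (m : Int) : Int := monthDays.getD (PySem.Int.mod (m - 1) 12).toNat 0

theorem isThisLeapYear_eq (y : Int) : isThisLeapYear y = monthDays := by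
  simp [isThisLeapYear, monthDays]

theorem md_eq (m : Int) (h1 : -11 ≤ m) (h2 : m ≤ 12) :
    PySem.List.pyGet? monthDays (m - 1) = some (mdOf m) := by
  interval_cases m <;> decide

theorem getTheNextDay_eq (d m y : Int) (h1 : -11 ≤ m) (h2 : m ≤ 12) :
    getTheNextDay d m y =
      some (if d < mdOf m then (d + 1, m, y)
            else if m < 12 then (1, m + 1, y) else (1, 1, y + 1)) := by
  unfold getTheNextDay
  rw [isThisLeapYear_eq, md_eq m h1 h2]
  show (if d < mdOf m then some (d + 1, m, y)
        else if m < 12 then some (1, m + 1, y) else some (1, 1, y + 1) : Option (Int × Int × Int)) =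
      some (if d < mdOf m then (d + 1, m, y)
            else if m < 12 then (1, m + 1, y) else (1, 1, y + 1))
  split_ifs <;> rfl

theorem loopA_stop (endD EndM EndY : Int) (f : Nat) (d m y : Int)
    (sAcc eAcc : List (List Int)) (h : ¬ y ≤ EndY) :
    loopA endD EndM EndY f d m y sAcc eAcc = (sAcc, eAcc) := by
  cases f with
  | zero => rfl
  | succ f => rw [loopA, if_neg h]

theorem loopB_stop (endD EndM EndY : Int) (f : Nat) (d m y : Int)
    (sAcc eAcc : List (List Int)) (h : ¬ y ≤ EndY) :
    loopB endD EndM EndY f d m y sAcc eAcc = (sAcc, eAcc) := by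
  cases f with
  | zero => rfl
  | succ f => rw [loopB, if_neg h]

-- the start / end entries B generates for one month-run (proof-only abbreviations)
def sBlk (d m y : Int) (n : Nat) : List (List Int) :=
  (List.range n).map (fun (i : Nat) => [d + (i : Int), m, y + 2 * (i : Int)])
def eBlk (endD EndM EndY d m y : Int) (n : Nat) : List (List Int) :=
  (List.range n).map (fun (i : Nat) =>
    if y + 2 * (i : Int) + 2 < EndY then [d + (i : Int), m, y + 2 * (i : Int) + 2]
    else [endD, EndM, EndY])

theorem loopB_pos (endD EndM EndY : Int) (f : Nat) (d m y : Int) (sAcc eAcc : List (List Int))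
    (h : y ≤ EndY) (h1 : -11 ≤ m) (h2 : m ≤ 12) :
    loopB endD EndM EndY (f + 1) d m y sAcc eAcc =
      (let run := min (max (mdOf m - d) 0 + 1) (PySem.Int.floordiv (EndY - y) 2 + 1)
       if m < 12 then
         loopB endD EndM EndY f 1 (m + 1) (y + 2 * run)
           (sAcc ++ sBlk d m y run.toNat) (eAcc ++ eBlk endD EndM EndY d m y run.toNat)
       else
         loopB endD EndM EndY f 1 1 (y + 2 * run + 1)
           (sAcc ++ sBlk d m y run.toNat) (eAcc ++ eBlk endD EndM EndY d m y run.toNat)) := by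
  conv_lhs => rw [loopB]
  rw [if_pos h]
  simp only [md_eq m h1 h2, sBlk, eBlk]

theorem sBlk_succ (d m y : Int) (n : Nat) :
    sBlk d m y (n + 1) = [d, m, y] :: sBlk (d + 1) m (y + 2) n := by
  unfold sBlk
  rw [List.range_succ_eq_map, List.map_cons, List.map_map]
  congr 1
  · norm_num
  · apply List.map_congr_left
    intro i _
    simp only [Function.comp, Nat.succ_eq_add_one]
    push_cast
    have h1 : d + ((i : Int) + 1) = d + 1 + (i : Int) := by ring
    have h2 : y + 2 * ((i : Int) + 1) = y + 2 + 2 * (i : Int) := by ring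
    rw [h1, h2]

theorem eBlk_succ (endD EndM EndY d m y : Int) (n : Nat) :
    eBlk endD EndM EndY d m y (n + 1) =
      (if y + 2 < EndY then [d, m, y + 2] else [endD, EndM, EndY]) ::
        eBlk endD EndM EndY (d + 1) m (y + 2) n := by
  unfold eBlk
  rw [List.range_succ_eq_map, List.map_cons, List.map_map]
  congr 1
  · norm_num
  · apply List.map_congr_left
    intro i _
    simp only [Function.comp, Nat.succ_eq_add_one]
    push_cast
    have h1 : y + 2 * ((i : Int) + 1) + 2 = y + 2 + 2 * (i : Int) + 2 := by ring
    have h2 : d + ((i : Int) + 1) = d + 1 + (i : Int) := by ring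
    rw [h1, h2]

-- one month-run of B equals run iterations of A's per-day loop
theorem blockA (k : Nat) : ∀ (F : Nat) (endD EndM EndY d m y : Int) (sAcc eAcc : List (List Int)),
    y ≤ EndY → -11 ≤ m → m ≤ 12 →
    (k : Int) + 1 = min (max (mdOf m - d) 0 + 1) (PySem.Int.floordiv (EndY - y) 2 + 1) →
    loopA endD EndM EndY (F + (k + 1)) d m y sAcc eAcc =
      (if m < 12 then
         loopA endD EndM EndY F 1 (m + 1) (y + 2 * ((k : Int) + 1))
           (sAcc ++ sBlk d m y (k + 1)) (eAcc ++ eBlk endD EndM EndY d m y (k + 1))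
       else
         loopA endD EndM EndY F 1 1 (y + 2 * ((k : Int) + 1) + 1)
           (sAcc ++ sBlk d m y (k + 1)) (eAcc ++ eBlk endD EndM EndY d m y (k + 1))) := by
  induction k with
  | zero =>
    intro F endD EndM EndY d m y sAcc eAcc hy hm1 hm2 hrun
    rw [PySem.Int.floordiv_eq_ediv_of_pos (by omega)] at hrun
    have hblkS : sBlk d m y 1 = [[d, m, y]] := by
      unfold sBlk; simp
    have hblkE : eBlk endD EndM EndY d m y 1 =
        [if y + 2 < EndY then [d, m, y + 2] else [endD, EndM, EndY]] := by
      unfold eBlk; simp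
    rw [hblkS, hblkE]
    have hF : F + (0 + 1) = F + 1 := rfl
    rw [hF]
    conv_lhs => rw [loopA]
    rw [if_pos hy]
    split
    · next heq => rw [getTheNextDay_eq d m (y + 2) hm1 hm2] at heq; simp at heq
    · next d' m' y' heq =>
      rw [getTheNextDay_eq d m (y + 2) hm1 hm2, Option.some.injEq] at heq
      by_cases hd : d < mdOf m
      · -- run cut to 1 by the year bound: next year exceeds EndY on both sides
        have hq : (EndY - y) / 2 = 0 := by omega
        have hy2 : ¬ (y + 2 ≤ EndY) := by omega
        rw [if_pos hd] at heq
        simp only [Prod.mk.injEq] at heq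
        obtain ⟨rfl, rfl, rfl⟩ := heq
        rw [loopA_stop _ _ _ _ _ _ _ _ _ hy2]
        split_ifs <;> rw [loopA_stop _ _ _ _ _ _ _ _ _ (by omega)]
      · rw [if_neg hd] at heq
        by_cases hm : m < 12
        · rw [if_pos hm] at heq
          simp only [Prod.mk.injEq] at heq
          obtain ⟨rfl, rfl, rfl⟩ := heq
          rw [if_pos hm]
          norm_num
        · rw [if_neg hm] at heq
          simp only [Prod.mk.injEq] at heq
          obtain ⟨rfl, rfl, rfl⟩ := heq
          rw [if_neg hm]
          norm_num
  | succ k ih =>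
    intro F endD EndM EndY d m y sAcc eAcc hy hm1 hm2 hrun
    rw [PySem.Int.floordiv_eq_ediv_of_pos (by omega)] at hrun
    have hd : d < mdOf m := by omega
    have hq1 : 1 ≤ (EndY - y) / 2 := by omega
    have hy2 : y + 2 ≤ EndY := by omega
    have hF : F + (k + 1 + 1) = (F + (k + 1)) + 1 := rfl
    rw [hF]
    conv_lhs => rw [loopA]
    rw [if_pos hy]
    split
    · next heq => rw [getTheNextDay_eq d m (y + 2) hm1 hm2] at heq; simp at heq
    · next d' m' y' heq =>
      rw [getTheNextDay_eq d m (y + 2) hm1 hm2, Option.some.injEq, if_pos hd] at heq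
      simp only [Prod.mk.injEq] at heq
      obtain ⟨rfl, rfl, rfl⟩ := heq
      have hrun' : (k : Int) + 1 =
          min (max (mdOf m - (d + 1)) 0 + 1) (PySem.Int.floordiv (EndY - (y + 2)) 2 + 1) := by
        rw [PySem.Int.floordiv_eq_ediv_of_pos (by omega)]
        have : (EndY - (y + 2)) / 2 = (EndY - y) / 2 - 1 := by omega
        omega
      rw [ih F endD EndM EndY (d + 1) m (y + 2) _ _ hy2 hm1 hm2 hrun']
      have hS := sBlk_succ d m y (k + 1)
      have hE := eBlk_succ endD EndM EndY d m y (k + 1)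
      push_cast
      rw [hS, hE]
      have hyy : y + 2 + 2 * ((k : Int) + 1) = y + 2 * ((k : Int) + 1 + 1) := by ring
      split_ifs <;> rw [hyy] <;> simp

-- A's per-day loop equals B's per-month-run loop, by strong induction on remaining years
theorem main_eq (n : Nat) : ∀ (fA fB : Nat) (endD EndM EndY d m y : Int) (sAcc eAcc : List (List Int)),
    (EndY + 1 - y).toNat ≤ n → (EndY + 1 - y).toNat ≤ fA → (EndY + 1 - y).toNat ≤ fB →
    (y ≤ EndY → -11 ≤ m ∧ m ≤ 12) →
    loopA endD EndM EndY fA d m y sAcc eAcc = loopB endD EndM EndY fB d m y sAcc eAcc := by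
  induction n using Nat.strong_induction_on with
  | _ n ih =>
    intro fA fB endD EndM EndY d m y sAcc eAcc hn hfA hfB hm
    by_cases hy : y ≤ EndY
    · obtain ⟨hm1, hm2⟩ := hm hy
      have hq : 0 ≤ PySem.Int.floordiv (EndY - y) 2 ∧
          PySem.Int.floordiv (EndY - y) 2 ≤ EndY - y := by
        rw [PySem.Int.floordiv_eq_ediv_of_pos (by omega)]
        constructor <;> omega
      set run := min (max (mdOf m - d) 0 + 1) (PySem.Int.floordiv (EndY - y) 2 + 1) with hrundef
      have hrun1 : 1 ≤ run := by omega
      have hrunle : run ≤ EndY + 1 - y := by omega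
      have hk : ((run - 1).toNat : Int) + 1 = run := by omega
      have hkN : run.toNat = (run - 1).toNat + 1 := by omega
      obtain ⟨fB', rfl⟩ : ∃ fB', fB = fB' + 1 := ⟨fB - 1, by omega⟩
      rw [loopB_pos endD EndM EndY fB' d m y sAcc eAcc hy hm1 hm2]
      simp only [← hrundef]
      have hfA' : fA = (fA - run.toNat) + ((run - 1).toNat + 1) := by omega
      rw [hfA',
          blockA (run - 1).toNat (fA - run.toNat) endD EndM EndY d m y sAcc eAcc hy hm1 hm2 (by rw [hk]),
          hk, hkN]
      have hlt : ∀ y' : Int, y + 2 ≤ y' → (EndY + 1 - y').toNat < n := by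
        intro y' hy'
        omega
      split_ifs with hmlt
      · exact ih _ (hlt (y + 2 * run) (by omega)) _ _ _ _ _ _ _ _ _ _ le_rfl (by omega) (by omega)
          (fun _ => ⟨by omega, by omega⟩)
      · exact ih _ (hlt (y + 2 * run + 1) (by omega)) _ _ _ _ _ _ _ _ _ _ le_rfl (by omega) (by omega)
          (fun _ => ⟨by omega, by omega⟩)
    · rw [loopA_stop _ _ _ _ _ _ _ _ _ hy, loopB_stop _ _ _ _ _ _ _ _ _ hy]

-- ===== VERDICT (by name: the statement is the Claim_ definition above) =====
theorem getListofsplitDates_spec : Claim_equal_getListofsplitDates := by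
  intro startD startM startY endD EndM EndY _ hpre
  unfold Spec_getListofsplitDates getListofsplitDates getListofsplitDates_alt
  exact main_eq ((EndY + 1 - startY).toNat) _ _ endD EndM EndY startD startM startY [] []
    le_rfl le_rfl le_rfl
    (by rcases hpre with h | h <;> intro hy <;> [omega; exact h])
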